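-- pv_equiv track=rewrite | github.com/jonas-kell/bachelor-thesis-code | structures/neighbors.py | triangular_hexagonal_qr_to_index
-- ===== SOURCE A (Python) =====
-- def triangular_hexagonal_qr_to_index(q, r, n, periodic_bounds=True):
--     assert n > 1
--
--     s = 0 - q - r
--     if max(abs(q), abs(r), abs(s)) >= n:
--         if periodic_bounds:
--             fixed = False
--             for try_q, try_r in [
--                 (q - 2 * n + 1, r + n - 1),
--                 (q - n + 1, r - n),
--                 (q + n, r - 2 * n + 1),
--                 (q + 2 * n - 1, r - n + 1),
--                 (q + n - 1, r + n),
--                 (q - n, r + 2 * n - 1),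
--             ]:
--                 try_s = 0 - try_q - try_r
--
--                 if max(abs(try_q), abs(try_r), abs(try_s)) < n:
--                     q = try_q
--                     r = try_r
--                     s = try_s
--
--                     fixed = True
--                     break
--
--             if not fixed:
--                 raise RuntimeError(
--                     f"Too far into periodic bounds, not defined: q({q}) r({r}) s({s}),  n({n})"
--                 )
--         else:
--             return -1
--
--     index = 0
--     for r_test in range(-n + 1, n):
--         for q_test in range(-n + 1, n):
--             s_test = 0 - q_test - r_test
--
--             if max(abs(q_test), abs(r_test), abs(s_test)) < n:
--                 if q == q_test and r == r_test:
--                     return index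
--
--                 index += 1
--     return -1
-- ===== SOURCE B (Python) =====
-- def triangular_hexagonal_qr_to_index(q, r, n, periodic_bounds=True):
--     assert n > 1
--     m = n - 1
--
--     def inside(qq, rr):
--         return max(abs(qq), abs(rr), abs(qq + rr)) < n
--
--     if not inside(q, r):
--         if not periodic_bounds:
--             return -1
--         for dq, dr in (
--             (-2 * n + 1, n - 1),
--             (-n + 1, -n),
--             (n, -2 * n + 1),
--             (2 * n - 1, -n + 1),
--             (n - 1, n),
--             (-n, 2 * n - 1),
--         ):
--             if inside(q + dq, r + dr):
--                 q += dq
--                 r += dr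
--                 break
--         else:
--             raise RuntimeError(
--                 f"Too far into periodic bounds, not defined: q({q}) r({r}) s({0 - q - r}),  n({n})"
--             )
--
--     # closed-form prefix of row widths (row r' has 2n-1-|r'| cells) plus in-row offset
--     if r <= 0:
--         k = r + m
--         prefix = k * n + k * (k - 1) // 2
--         qmin = -m - r
--     else:
--         prefix = m * n + m * (m - 1) // 2 + r * (2 * n - 1) - r * (r - 1) // 2
--         qmin = -m
--     return prefix + (q - qmin)
-- ===== Notes on version B (the rewrite author's own statement) =====
-- stated objective: alternative
-- what changed: A finds the index by scanning the entire (2n-1)x(2n-1) q,r grid cell by cell counting valid cells until it hits (q,r); B computes the index directly as a closed-form prefix sum of the hexagon's row widths (2n-1-|r'|) plus the in-row offset q - qmin(r).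
import Mathlib
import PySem

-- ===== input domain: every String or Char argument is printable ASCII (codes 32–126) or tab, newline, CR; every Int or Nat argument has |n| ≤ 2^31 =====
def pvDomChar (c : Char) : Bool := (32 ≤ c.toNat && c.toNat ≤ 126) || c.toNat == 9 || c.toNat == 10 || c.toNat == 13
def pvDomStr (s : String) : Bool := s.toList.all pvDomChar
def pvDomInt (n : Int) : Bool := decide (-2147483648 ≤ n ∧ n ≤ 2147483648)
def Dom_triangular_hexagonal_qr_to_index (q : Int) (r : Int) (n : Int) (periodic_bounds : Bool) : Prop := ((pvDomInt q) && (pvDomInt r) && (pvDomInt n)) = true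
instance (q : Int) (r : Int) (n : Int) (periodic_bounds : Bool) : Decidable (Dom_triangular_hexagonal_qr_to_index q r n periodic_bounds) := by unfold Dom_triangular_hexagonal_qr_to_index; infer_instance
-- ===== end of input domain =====

-- B replaces A's double scan over the whole grid by a closed-form prefix count of
-- row widths plus the in-row offset (alternative algorithm).

-- ===== PORT A =====
-- the six periodic candidate cells, in A's order
def thCandsA (q r n : Int) : List (Int × Int) :=
  [(q - 2 * n + 1, r + n - 1), (q - n + 1, r - n), (q + n, r - 2 * n + 1),
   (q + 2 * n - 1, r - n + 1), (q + n - 1, r + n), (q - n, r + 2 * n - 1)]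

-- A's for-loop over the candidates: first candidate strictly inside the hexagon
def thFirstFixA (n : Int) : List (Int × Int) → Option (Int × Int)
  | [] => none
  | (tq, tr) :: rest =>
      if max (max |tq| |tr|) |0 - tq - tr| < n then some (tq, tr)
      else thFirstFixA n rest

-- A's inner loop over q_test (index accumulator; .inl = early return, .inr = fall through)
def thQLoopA (q r r_test n : Int) : List Int → Int → Sum Int Int
  | [], index => .inr index
  | q_test :: rest, index =>
      if max (max |q_test| |r_test|) |0 - q_test - r_test| < n then
        if q = q_test ∧ r = r_test then .inl index
        else thQLoopA q r r_test n rest (index + 1)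
      else thQLoopA q r r_test n rest index

-- A's outer loop over r_test
def thRLoopA (q r n : Int) : List Int → Int → Int
  | [], _ => -1
  | r_test :: rest, index =>
      match thQLoopA q r r_test n (PySem.List.pyRange (-n + 1) n 1) index with
      | .inl i => i
      | .inr index' => thRLoopA q r n rest index'

def triangular_hexagonal_qr_to_index (q : Int) (r : Int) (n : Int) (periodic_bounds : Bool) : Int :=
  -- 'assert n > 1' raises AssertionError for n ≤ 1: excluded by Pre_
  if max (max |q| |r|) |0 - q - r| ≥ n then
    if periodic_bounds then
      match thFirstFixA n (thCandsA q r n) with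
      | some (q', r') => thRLoopA q' r' n (PySem.List.pyRange (-n + 1) n 1) 0
      | none => 0  -- Python raises RuntimeError here: excluded by Pre_
    else -1
  else thRLoopA q r n (PySem.List.pyRange (-n + 1) n 1) 0

-- ===== PORT B =====
-- Source B's 'inside' helper
def thInsideB (q r n : Int) : Bool := decide (max (max |q| |r|) |q + r| < n)

-- Source B's delta table
def thDeltasB (n : Int) : List (Int × Int) :=
  [(-2 * n + 1, n - 1), (-n + 1, -n), (n, -2 * n + 1),
   (2 * n - 1, -n + 1), (n - 1, n), (-n, 2 * n - 1)]

-- Source B's for-loop over the deltas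
def thFirstFixB (q r n : Int) : List (Int × Int) → Option (Int × Int)
  | [] => none
  | (dq, dr) :: rest =>
      if thInsideB (q + dq) (r + dr) n then some (q + dq, r + dr)
      else thFirstFixB q r n rest

-- Source B's closed-form index: prefix of row widths + in-row offset
def thClosedB (q r n : Int) : Int :=
  let m := n - 1
  if r ≤ 0 then
    let k := r + m
    k * n + PySem.Int.floordiv (k * (k - 1)) 2 + (q - (-m - r))
  else
    m * n + PySem.Int.floordiv (m * (m - 1)) 2 + r * (2 * n - 1)
      - PySem.Int.floordiv (r * (r - 1)) 2 + (q - (-m))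

def triangular_hexagonal_qr_to_index_alt (q : Int) (r : Int) (n : Int) (periodic_bounds : Bool) : Int :=
  -- 'assert n > 1' raises AssertionError for n ≤ 1: excluded by Pre_
  if thInsideB q r n then thClosedB q r n
  else if !periodic_bounds then -1
  else match thFirstFixB q r n (thDeltasB n) with
       | some (q', r') => thClosedB q' r' n
       | none => 0  -- Source B raises RuntimeError here: excluded by Pre_

-- ===== PRECONDITION & SPEC =====
-- Pre_ excludes exactly the inputs where Python A raises: n ≤ 1 (AssertionError), and
-- out-of-bounds periodic inputs too far out for all six translations (RuntimeError).
def Pre_triangular_hexagonal_qr_to_index (q : Int) (r : Int) (n : Int) (periodic_bounds : Bool) : Prop :=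
  1 < n ∧
  (n ≤ max (max |q| |r|) |q + r| → periodic_bounds = true →
    (max (max |q - 2 * n + 1| |r + n - 1|) |q + r - n| < n ∨
     max (max |q - n + 1| |r - n|) |q + r - 2 * n + 1| < n ∨
     max (max |q + n| |r - 2 * n + 1|) |q + r - n + 1| < n ∨
     max (max |q + 2 * n - 1| |r - n + 1|) |q + r + n| < n ∨
     max (max |q + n - 1| |r + n|) |q + r + 2 * n - 1| < n ∨
     max (max |q - n| |r + 2 * n - 1|) |q + r + n - 1| < n))
instance (q : Int) (r : Int) (n : Int) (periodic_bounds : Bool) : Decidable (Pre_triangular_hexagonal_qr_to_index q r n periodic_bounds) := by unfold Pre_triangular_hexagonal_qr_to_index; infer_instance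

def pvWitness_triangular_hexagonal_qr_to_index : Int × Int × Int × Bool := (0, 0, 2, true)

def Spec_triangular_hexagonal_qr_to_index (q : Int) (r : Int) (n : Int) (periodic_bounds : Bool) (out : Int) : Prop := out = triangular_hexagonal_qr_to_index_alt q r n periodic_bounds
instance (q : Int) (r : Int) (n : Int) (periodic_bounds : Bool) (out : Int) : Decidable (Spec_triangular_hexagonal_qr_to_index q r n periodic_bounds out) := by unfold Spec_triangular_hexagonal_qr_to_index; infer_instance

-- ===== CLAIM (what is proved, stated in full; the proofs are below) =====
def Claim_equal_triangular_hexagonal_qr_to_index : Prop := ∀ (q : Int) (r : Int) (n : Int) (periodic_bounds : Bool), Dom_triangular_hexagonal_qr_to_index q r n periodic_bounds → Pre_triangular_hexagonal_qr_to_index q r n periodic_bounds → Spec_triangular_hexagonal_qr_to_index q r n periodic_bounds (triangular_hexagonal_qr_to_index q r n periodic_bounds)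

-- ===== LEMMAS AND PROOFS =====

-- triangular number helper (proof-side only)
def thTri (k : Int) : Int := PySem.Int.floordiv (k * (k - 1)) 2

-- prefix count of cells in rows < r (extends B's formula to all rows)
def thP (r n : Int) : Int :=
  if r ≤ 0 then (r + n - 1) * n + thTri (r + n - 1)
  else (n - 1) * n + thTri (n - 1) + r * (2 * n - 1) - thTri r

-- leftmost / rightmost valid q in row r
def thLo (r n : Int) : Int := max (-n + 1) (-n + 1 - r)
def thHi (r n : Int) : Int := min (n - 1) (n - 1 - r)

theorem thTri_succ (k : Int) : thTri (k + 1) = thTri k + k := by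
  obtain ⟨c, hc⟩ : Even (k * (k - 1)) := by
    have := Int.even_mul_succ_self (k - 1)
    simpa [mul_comm] using this
  have h1 : k * (k - 1) = 2 * c := by omega
  have h2 : (k + 1) * (k + 1 - 1) = 2 * (c + k) := by linear_combination h1
  unfold thTri
  rw [h1, h2, PySem.Int.floordiv_eq_ediv_of_pos (by norm_num),
      PySem.Int.floordiv_eq_ediv_of_pos (by norm_num),
      Int.mul_ediv_cancel_left _ (by norm_num), Int.mul_ediv_cancel_left _ (by norm_num)]

theorem thTri_zero : thTri 0 = 0 := by decide
theorem thTri_one : thTri 1 = 0 := by decide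

theorem thP_succ (a n : Int) (hn : 1 ≤ n) (h1 : -n + 1 ≤ a) (h2 : a ≤ n - 1) :
    thP (a + 1) n = thP a n + (2 * n - 1 - |a|) := by
  unfold thP
  rcases lt_trichotomy a 0 with ha | ha | ha
  · have habs : |a| = -a := abs_of_nonpos (by omega)
    rw [if_pos (by omega), if_pos (by omega), habs,
        show a + 1 + n - 1 = (a + n - 1) + 1 by ring, thTri_succ]
    ring
  · subst ha
    rw [if_neg (by omega), if_pos (by omega)]
    norm_num [thTri_one]
  · have habs : |a| = a := abs_of_nonneg (by omega)
    rw [if_neg (by omega), if_neg (by omega), habs, thTri_succ]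
    ring

theorem thP_base (n : Int) (hn : 1 ≤ n) : thP (-n + 1) n = 0 := by
  unfold thP
  rw [if_pos (by omega), show -n + 1 + n - 1 = 0 by ring, thTri_zero]
  ring

-- validity of a cell in a row with |r_test| < n
theorem thValid_iff (qt rt n : Int) (h1 : -n + 1 ≤ rt) (h2 : rt ≤ n - 1) :
    (max (max |qt| |rt|) |0 - qt - rt| < n) ↔ (thLo rt n ≤ qt ∧ qt ≤ thHi rt n) := by
  unfold thLo thHi
  rw [max_lt_iff, max_lt_iff, abs_lt, abs_lt, abs_lt]
  omega

theorem pyRange_one_nil (a b : Int) (h : b ≤ a) : PySem.List.pyRange a b 1 = [] := by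
  rw [PySem.List.pyRange_one]
  simp [Int.toNat_of_nonpos (by omega : b - a ≤ 0)]

-- inner loop, row r_test ≠ r: falls through having counted the valid cells of [a, n)
theorem thQLoopA_skip (q r rt n : Int) (h1 : -n + 1 ≤ rt) (h2 : rt ≤ n - 1) (hne : r ≠ rt) :
    ∀ (k : Nat) (a idx : Int), (n - a).toNat = k → -n + 1 ≤ a →
      thQLoopA q r rt n (PySem.List.pyRange a n 1) idx
        = .inr (idx + max 0 (thHi rt n + 1 - max a (thLo rt n))) := by
  intro k
  induction k with
  | zero =>
      intro a idx hk ha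
      rw [pyRange_one_nil a n (by omega)]
      have : thHi rt n + 1 - max a (thLo rt n) ≤ 0 := by unfold thHi thLo at *; omega
      simp [thQLoopA]
      omega
  | succ k ih =>
      intro a idx hk ha
      have hab : a < n := by omega
      rw [PySem.List.pyRange_one_cons hab]
      unfold thQLoopA
      by_cases hv : max (max |a| |rt|) |0 - a - rt| < n
      · rw [if_pos hv, if_neg (by rintro ⟨_, h⟩; exact hne h)]
        rw [ih (a + 1) (idx + 1) (by omega) (by omega)]
        have hva := (thValid_iff a rt n h1 h2).mp hv
        unfold thHi thLo at *
        congr 1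
        omega
      · rw [if_neg hv]
        rw [ih (a + 1) idx (by omega) (by omega)]
        have hva := (thValid_iff a rt n h1 h2).not.mp hv
        unfold thHi thLo at *
        congr 1
        omega

-- inner loop, row r_test = r containing (q, r): early return with the in-row offset
theorem thQLoopA_find (q rt n : Int) (h1 : -n + 1 ≤ rt) (h2 : rt ≤ n - 1)
    (hq1 : thLo rt n ≤ q) (hq2 : q ≤ thHi rt n) :
    ∀ (k : Nat) (a idx : Int), (q - a).toNat = k → -n + 1 ≤ a → a ≤ q →
      thQLoopA q rt rt n (PySem.List.pyRange a n 1) idx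
        = .inl (idx + (q - max a (thLo rt n))) := by
  intro k
  induction k with
  | zero =>
      intro a idx hk ha haq
      have haq' : a = q := by omega
      subst haq'
      have hlt : a < n := by unfold thHi thLo at *; omega
      rw [PySem.List.pyRange_one_cons hlt]
      unfold thQLoopA
      rw [if_pos ((thValid_iff a rt n h1 h2).mpr ⟨hq1, hq2⟩), if_pos ⟨rfl, rfl⟩]
      have : max a (thLo rt n) = a := by unfold thLo at *; omega
      rw [this]
      ring_nf
  | succ k ih =>
      intro a idx hk ha haq
      have hlt : a < n := by unfold thHi thLo at *; omega
      rw [PySem.List.pyRange_one_cons hlt]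
      unfold thQLoopA
      by_cases hv : max (max |a| |rt|) |0 - a - rt| < n
      · rw [if_pos hv, if_neg (by rintro ⟨h, _⟩; omega)]
        rw [ih (a + 1) (idx + 1) (by omega) (by omega) (by omega)]
        have hva := (thValid_iff a rt n h1 h2).mp hv
        unfold thLo at *
        congr 1
        omega
      · rw [if_neg hv]
        rw [ih (a + 1) idx (by omega) (by omega) (by omega)]
        have hva := (thValid_iff a rt n h1 h2).not.mp hv
        unfold thLo at *
        congr 1
        omega

-- outer loop: prefix sum of row widths plus the in-row offset
theorem thRLoopA_main (q r n : Int) (hn : 1 ≤ n) (hr1 : -n + 1 ≤ r) (hr2 : r ≤ n - 1)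
    (hq1 : thLo r n ≤ q) (hq2 : q ≤ thHi r n) :
    ∀ (k : Nat) (a idx : Int), (r - a).toNat = k → -n + 1 ≤ a → a ≤ r →
      thRLoopA q r n (PySem.List.pyRange a n 1) idx
        = idx + (thP r n - thP a n) + (q - thLo r n) := by
  intro k
  induction k with
  | zero =>
      intro a idx hk ha har
      have haq : a = r := by omega
      subst haq
      rw [PySem.List.pyRange_one_cons (by omega : a < n)]
      unfold thRLoopA
      rw [thQLoopA_find q a n hr1 hr2 hq1 hq2 (q - (-n + 1)).toNat (-n + 1) idx
            rfl (by omega) (by unfold thLo at hq1; omega)]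
      dsimp only
      have : max (-n + 1) (thLo a n) = thLo a n := by unfold thLo; omega
      rw [this]
      ring
  | succ k ih =>
      intro a idx hk ha har
      rw [PySem.List.pyRange_one_cons (by omega : a < n)]
      unfold thRLoopA
      rw [thQLoopA_skip q r a n (by omega) (by omega) (by omega) (n - (-n + 1)).toNat
            (-n + 1) idx rfl (by omega)]
      dsimp only
      rw [ih (a + 1) _ (by omega) (by omega) (by omega)]
      have hw : max 0 (thHi a n + 1 - max (-n + 1) (thLo a n)) = 2 * n - 1 - |a| := by
        rcases abs_cases a with ⟨h, _⟩ | ⟨h, _⟩ <;> (unfold thHi thLo; omega)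
      rw [hw, thP_succ a n hn (by omega) (by omega)]
      ring

-- B's closed form agrees with the prefix-plus-offset characterisation
theorem thClosedB_eq (q r n : Int) (hn : 1 ≤ n) (hr1 : -n + 1 ≤ r) (hr2 : r ≤ n - 1) :
    thClosedB q r n = thP r n + (q - thLo r n) := by
  unfold thClosedB thP thTri thLo
  by_cases hr : r ≤ 0
  · rw [if_pos hr, if_pos hr, max_eq_right (by omega : -n + 1 ≤ -n + 1 - r)]
    ring
  · rw [if_neg hr, if_neg hr, max_eq_left (by omega : -n + 1 - r ≤ -n + 1)]
    ring

-- the full search from the start equals B's closed form, for any in-bounds cell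
theorem thSearch_eq (q r n : Int) (hn : 1 ≤ n) (hin : max (max |q| |r|) |q + r| < n) :
    thRLoopA q r n (PySem.List.pyRange (-n + 1) n 1) 0 = thClosedB q r n := by
  have hin' : max (max |q| |r|) |0 - q - r| < n := by
    rwa [show (0:Int) - q - r = -(q + r) by ring, abs_neg]
  have hr : -n + 1 ≤ r ∧ r ≤ n - 1 := by
    rw [max_lt_iff, max_lt_iff, abs_lt, abs_lt, abs_lt] at hin; omega
  have hq := (thValid_iff q r n hr.1 hr.2).mp hin'
  rw [thRLoopA_main q r n hn hr.1 hr.2 hq.1 hq.2 (r - (-n + 1)).toNat (-n + 1) 0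
        rfl le_rfl (by unfold thLo thHi at hq; omega),
      thP_base n hn, thClosedB_eq q r n hn hr.1 hr.2]
  ring

-- the two candidate loops pick the same cell
theorem thFix_eq (q r n : Int) : thFirstFixA n (thCandsA q r n) = thFirstFixB q r n (thDeltasB n) := by
  have habs : ∀ x y : Int, |0 - x - y| = |x + y| := fun x y => by
    rw [show (0:Int) - x - y = -(x + y) by ring, abs_neg]
  simp only [thFirstFixA, thFirstFixB, thCandsA, thDeltasB, thInsideB,
    decide_eq_true_eq, habs]
  ring_nf

-- a successful fix is in bounds
theorem thFirstFixB_inside (q r n : Int) :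
    ∀ (l : List (Int × Int)) (a b : Int), thFirstFixB q r n l = some (a, b) →
      max (max |a| |b|) |a + b| < n := by
  intro l
  induction l with
  | nil => intro a b h; simp [thFirstFixB] at h
  | cons p rest ih =>
      intro a b h
      obtain ⟨dq, dr⟩ := p
      unfold thFirstFixB at h
      by_cases hv : thInsideB (q + dq) (r + dr) n
      · rw [if_pos hv] at h
        obtain ⟨h1, h2⟩ : q + dq = a ∧ r + dr = b := by
          simpa using h
        subst h1; subst h2
        simpa [thInsideB] using hv
      · rw [if_neg hv] at h
        exact ih a b h

-- ===== VERDICT (by name: the statement is the Claim_ definition above) =====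
theorem triangular_hexagonal_qr_to_index_spec : Claim_equal_triangular_hexagonal_qr_to_index := by
  intro q r n pb _ hpre
  obtain ⟨hn, hfix⟩ := hpre
  unfold Spec_triangular_hexagonal_qr_to_index
  unfold triangular_hexagonal_qr_to_index triangular_hexagonal_qr_to_index_alt
  by_cases hin : max (max |q| |r|) |q + r| < n
  · have hA : ¬ max (max |q| |r|) |0 - q - r| ≥ n := by
      rw [show (0:Int) - q - r = -(q + r) by ring, abs_neg]; omega
    have hB : thInsideB q r n = true := by
      simp only [thInsideB, decide_eq_true_eq]; exact hin
    rw [if_neg hA, if_pos hB]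
    exact thSearch_eq q r n (by omega) hin
  · have hA : max (max |q| |r|) |0 - q - r| ≥ n := by
      rw [show (0:Int) - q - r = -(q + r) by ring, abs_neg]; omega
    have hB : ¬ thInsideB q r n = true := by
      simp only [thInsideB, decide_eq_true_eq]; exact hin
    rw [if_pos hA, if_neg hB]
    cases pb with
    | false => simp
    | true =>
        rw [if_pos rfl, if_neg (by simp)]
        rw [thFix_eq q r n]
        cases hfb : thFirstFixB q r n (thDeltasB n) with
        | none => rfl
        | some p =>
            obtain ⟨q', r'⟩ := p
            exact thSearch_eq q' r' n (by omega)
              (thFirstFixB_inside q r n (thDeltasB n) q' r' hfb)
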